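-- pv_equiv track=rewrite | github.com/wbcat001/NarrativeVisualization | Codility/rakuten.py | solution
-- ===== SOURCE A (Python) =====
-- def is_overlapping( t1, b1, t2, b2):
--
--         if t1[0] > b2[0] or t2[0] > b1[0] or t1[1] > b2[1] or t2[1] > b1[1]:
--             return False
--         return True
--
-- def solution(A):
--
--     if not A or not A[0]:
--         return 0
--
--     n, m = len(A), len(A[0])
--
--     dp = [[0] * m for _ in range(n)]
--     for i in range(n):
--         for j in range(m):
--             if A[i][j]:
--                 if i == 0 or j == 0:
--                     dp[i][j] = 1
--                 else:
--                     dp[i][j] = min(dp[i-1][j], dp[i][j-1], dp[i-1][j-1]) + 1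
--
--     rect_dict = {}
--
--     for i in range(n):
--         for j in range(m):
--             size = dp[i][j]
--             if size > 0:
--                 if size not in rect_dict:
--                     rect_dict[size] = []
--
--                 rect_dict[size].append(((i - size + 1, j - size + 1), (i, j)))
--
--     for size in sorted(rect_dict.keys(), reverse=True):
--
--         rect = rect_dict[size]
--
--         for i in range(len(rect)):
--             for j in range( i + 1, len(rect)):
--
--                 if not is_overlapping(rect[i][0], rect[i][1], rect[j][0], rect[j][1]):
--                     return size * size
--
--     return 0
-- ===== SOURCE B (Python) =====
-- def solution(A):
--     if not A or not A[0]: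
--         return 0
--
--     n, m = len(A), len(A[0])
--
--     dp = [[0] * m for _ in range(n)]
--     for i in range(n):
--         for j in range(m):
--             if A[i][j]:
--                 if i == 0 or j == 0:
--                     dp[i][j] = 1
--                 else:
--                     dp[i][j] = min(dp[i-1][j], dp[i][j-1], dp[i-1][j-1]) + 1
--
--     # Per square size keep only the min/max row and column of the bottom-right
--     # corners: two size-s squares are disjoint iff the row spread or the column
--     # spread reaches s, so no pairwise scan is needed.
--     stats = {}
--     for i in range(n):
--         for j in range(m):
--             s = dp[i][j]
--             if s > 0:
--                 if s in stats:
--                     lo_i, hi_i, lo_j, hi_j = stats[s]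
--                     stats[s] = (min(lo_i, i), max(hi_i, i), min(lo_j, j), max(hi_j, j))
--                 else:
--                     stats[s] = (i, i, j, j)
--
--     for s in sorted(stats, reverse=True):
--         lo_i, hi_i, lo_j, hi_j = stats[s]
--         if hi_i - lo_i >= s or hi_j - lo_j >= s:
--             return s * s
--
--     return 0
-- ===== Notes on version B (the rewrite author's own statement) =====
-- stated objective: alternative
-- what changed: After the shared maximal-square dp pass, A stores every square per size and scans all pairs with an overlap test, while B keeps only per-size min/max row and column of the bottom-right corners and decides 'two disjoint equal squares exist' from the spread (spread >= size in either axis), replacing the quadratic pair scan.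
import Mathlib
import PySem

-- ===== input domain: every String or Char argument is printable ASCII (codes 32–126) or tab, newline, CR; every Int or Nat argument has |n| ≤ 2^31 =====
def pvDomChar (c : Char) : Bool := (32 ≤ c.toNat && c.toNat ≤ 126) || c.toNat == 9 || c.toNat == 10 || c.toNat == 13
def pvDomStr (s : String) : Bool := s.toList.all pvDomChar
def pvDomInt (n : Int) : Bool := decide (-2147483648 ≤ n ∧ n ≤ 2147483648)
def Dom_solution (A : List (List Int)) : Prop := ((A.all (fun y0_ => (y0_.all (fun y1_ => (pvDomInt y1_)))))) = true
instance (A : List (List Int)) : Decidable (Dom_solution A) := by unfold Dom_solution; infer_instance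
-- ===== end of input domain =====

-- B replaces A's per-size quadratic scan over all pairs of maximal squares by per-size
-- min/max row/column spreads of the bottom-right corners (two equal-size squares are
-- disjoint iff one spread reaches the size); the dp table construction is the forced
-- recurrence and is shared verbatim (helper buildDp below is its common transliteration).

-- ===== PORT A =====
def isOverlapping (t1 b1 t2 b2 : Int × Int) : Bool :=
  if t1.1 > b2.1 ∨ t2.1 > b1.1 ∨ t1.2 > b2.2 ∨ t2.2 > b1.2 then false else true

def getRow (T : List (List Int)) (i : Int) : List Int := (PySem.List.pyGet? T i).getD []
def getCell (T : List (List Int)) (i j : Int) : Int := (PySem.List.pyGet? (getRow T i) j).getD 0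

-- the dp loops of Source A/Source B (identical text in both sources); reads are in range under Pre_
def buildDp (A : List (List Int)) (n m : Int) : List (List Int) :=
  (PySem.List.pyRange 0 n 1).foldl (fun dp i =>
    dp ++ [(PySem.List.pyRange 0 m 1).foldl (fun row j =>
      row ++ [if getCell A i j ≠ 0 then
                (if i = 0 ∨ j = 0 then (1 : Int)
                 else min (min (getCell dp (i-1) j) ((PySem.List.pyGet? row (j-1)).getD 0))
                          (getCell dp (i-1) (j-1)) + 1)
              else 0]) []]) []

-- 'if size not in rect_dict: rect_dict[size] = []' then 'rect_dict[size].append(...)'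
def rectStep (d : PySem.Dict Int (List ((Int × Int) × (Int × Int)))) (i j size : Int) :
    PySem.Dict Int (List ((Int × Int) × (Int × Int))) :=
  if 0 < size then
    let d1 := if d.contains size then d else d.insert size []
    d1.insert size (d1.getD size [] ++ [((i - size + 1, j - size + 1), (i, j))])
  else d

def rectDictOf (dp : List (List Int)) (n m : Int) :
    PySem.Dict Int (List ((Int × Int) × (Int × Int))) :=
  (PySem.List.pyRange 0 n 1).foldl (fun d i =>
    (PySem.List.pyRange 0 m 1).foldl (fun d j => rectStep d i j (getCell dp i j)) d)
    PySem.Dict.empty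

-- the 'for i … for j in range(i+1, …)' pair scan with early return
def pairSearch : List ((Int × Int) × (Int × Int)) → Bool
  | [] => false
  | x :: xs => xs.any (fun y => !(isOverlapping x.1 x.2 y.1 y.2)) || pairSearch xs

def searchA (rd : PySem.Dict Int (List ((Int × Int) × (Int × Int)))) : List Int → Int
  | [] => 0
  | s :: rest => if pairSearch (rd.getD s []) then s * s else searchA rd rest

def solution (A : List (List Int)) : Int :=
  match A with
  | [] => 0
  | r0 :: rs =>
    if r0 = [] then 0
    else
      let n : Int := PySem.List.len (r0 :: rs)
      let m : Int := PySem.List.len r0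
      let dp := buildDp (r0 :: rs) n m
      let rd := rectDictOf dp n m
      searchA rd (PySem.List.sorted rd.keys (fun x => x) true)

-- ===== PORT B =====
-- stats[s] = (lo_i, hi_i, lo_j, hi_j)
def statStep (d : PySem.Dict Int (Int × Int × Int × Int)) (i j s : Int) :
    PySem.Dict Int (Int × Int × Int × Int) :=
  if 0 < s then
    if d.contains s then
      let q := d.getD s (0, 0, 0, 0)
      d.insert s (min q.1 i, max q.2.1 i, min q.2.2.1 j, max q.2.2.2 j)
    else d.insert s (i, i, j, j)
  else d

def statsOf (dp : List (List Int)) (n m : Int) : PySem.Dict Int (Int × Int × Int × Int) :=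
  (PySem.List.pyRange 0 n 1).foldl (fun d i =>
    (PySem.List.pyRange 0 m 1).foldl (fun d j => statStep d i j (getCell dp i j)) d)
    PySem.Dict.empty

def searchB (sd : PySem.Dict Int (Int × Int × Int × Int)) : List Int → Int
  | [] => 0
  | s :: rest =>
    -- stats[s]: s is drawn from sd's keys, so the default is never used
    if (sd.getD s (0, 0, 0, 0)).2.1 - (sd.getD s (0, 0, 0, 0)).1 ≥ s ∨
       (sd.getD s (0, 0, 0, 0)).2.2.2 - (sd.getD s (0, 0, 0, 0)).2.2.1 ≥ s
    then s * s else searchB sd rest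

def solution_alt (A : List (List Int)) : Int :=
  match A with
  | [] => 0
  | r0 :: rs =>
    if r0 = [] then 0
    else
      let n : Int := PySem.List.len (r0 :: rs)
      let m : Int := PySem.List.len r0
      let dp := buildDp (r0 :: rs) n m
      let sd := statsOf dp n m
      searchB sd (PySem.List.sorted sd.keys (fun x => x) true)

-- ===== PRECONDITION & SPEC =====
-- Pre_ excludes exactly the ragged inputs on which both Pythons raise IndexError:
-- a nonempty first row together with some later row shorter than it.
def Pre_solution (A : List (List Int)) : Prop :=
  A = [] ∨ A.head? = some [] ∨ ∀ row ∈ A, (A.headD []).length ≤ row.length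
instance (A : List (List Int)) : Decidable (Pre_solution A) := by unfold Pre_solution; infer_instance

def pvWitness_solution : List (List Int) := [[1, 1], [1, 1]]

def Spec_solution (A : List (List Int)) (out : Int) : Prop := out = solution_alt A
instance (A : List (List Int)) (out : Int) : Decidable (Spec_solution A out) := by unfold Spec_solution; infer_instance

-- ===== CLAIM (what is proved, stated in full; the proofs are below) =====
def Claim_equal_solution : Prop := ∀ (A : List (List Int)), Dom_solution A → Pre_solution A → Spec_solution A (solution A)

-- ===== LEMMAS AND PROOFS =====

-- the flattened row-major cell stream (i, j, dp[i][j]) both second passes fold over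
def cellsOf (dp : List (List Int)) (n m : Int) : List (Int × Int × Int) :=
  (PySem.List.pyRange 0 n 1).flatMap (fun i =>
    (PySem.List.pyRange 0 m 1).map (fun j => (i, j, getCell dp i j)))

def rectOf (s : Int) (c : Int × Int × Int) : (Int × Int) × (Int × Int) :=
  ((c.1 - s + 1, c.2.1 - s + 1), (c.1, c.2.1))

def mmFold (o : Option (Int × Int × Int × Int)) (cs : List (Int × Int × Int)) :
    Option (Int × Int × Int × Int) :=
  cs.foldl (fun o c =>
    match o with
    | none => some (c.1, c.1, c.2.1, c.2.1)
    | some q => some (min q.1 c.1, max q.2.1 c.1, min q.2.2.1 c.2.1, max q.2.2.2 c.2.1)) o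

lemma doubleFold_eq {σ : Type} (f : σ → Int → Int → Int → σ) (dp : List (List Int))
    (js : List Int) : ∀ (is : List Int) (st : σ),
    is.foldl (fun d i => js.foldl (fun d j => f d i j (getCell dp i j)) d) st
    = (is.flatMap (fun i => js.map (fun j => (i, j, getCell dp i j)))).foldl
        (fun d c => f d c.1 c.2.1 c.2.2) st := by
  intro is
  induction is with
  | nil => intro st; rfl
  | cons x xs ih =>
    intro st
    simp only [List.foldl_cons, List.flatMap_cons, List.foldl_append, List.foldl_map, ih]

lemma rectDictOf_eq (dp : List (List Int)) (n m : Int) :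
    rectDictOf dp n m = (cellsOf dp n m).foldl (fun d c => rectStep d c.1 c.2.1 c.2.2)
      PySem.Dict.empty := by
  unfold rectDictOf cellsOf
  exact doubleFold_eq _ dp _ _ _

lemma statsOf_eq (dp : List (List Int)) (n m : Int) :
    statsOf dp n m = (cellsOf dp n m).foldl (fun d c => statStep d c.1 c.2.1 c.2.2)
      PySem.Dict.empty := by
  unfold statsOf cellsOf
  exact doubleFold_eq _ dp _ _ _

lemma keys_rectStep (d : PySem.Dict Int (List ((Int × Int) × (Int × Int)))) (i j s : Int) :
    (rectStep d i j s).keys = if 0 < s ∧ d.contains s = false then d.keys ++ [s] else d.keys := by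
  by_cases hs : 0 < s
  · by_cases hc : d.contains s = true
    · simp only [rectStep, if_pos hs, hc, if_true]
      rw [PySem.Dict.keys_insert_of_contains d _ hc]
      simp
    · have hc' : d.contains s = false := by simpa using hc
      simp only [rectStep, if_pos hs, hc', Bool.false_eq_true, if_false]
      rw [PySem.Dict.keys_insert_of_contains _ _ (PySem.Dict.contains_insert_self d s []),
          PySem.Dict.keys_insert_of_not_contains d _ hc']
      simp [hs]
  · simp [rectStep, hs]

lemma keys_statStep (d : PySem.Dict Int (Int × Int × Int × Int)) (i j s : Int) :
    (statStep d i j s).keys = if 0 < s ∧ d.contains s = false then d.keys ++ [s] else d.keys := by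
  by_cases hs : 0 < s
  · by_cases hc : d.contains s = true
    · simp only [statStep, if_pos hs, hc, if_true]
      rw [PySem.Dict.keys_insert_of_contains d _ hc]
      simp
    · have hc' : d.contains s = false := by simpa using hc
      simp only [statStep, if_pos hs, hc', Bool.false_eq_true, if_false]
      rw [PySem.Dict.keys_insert_of_not_contains d _ hc']
      simp [hs]
  · simp [statStep, hs]

lemma keys_fold_eq : ∀ (cs : List (Int × Int × Int))
    (dA : PySem.Dict Int (List ((Int × Int) × (Int × Int))))
    (dB : PySem.Dict Int (Int × Int × Int × Int)), dA.keys = dB.keys →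
    (cs.foldl (fun d c => rectStep d c.1 c.2.1 c.2.2) dA).keys
    = (cs.foldl (fun d c => statStep d c.1 c.2.1 c.2.2) dB).keys := by
  intro cs
  induction cs with
  | nil => intro dA dB h; exact h
  | cons c cs ih =>
    intro dA dB h
    simp only [List.foldl_cons]
    apply ih
    have hc : dA.contains c.2.2 = dB.contains c.2.2 := by
      rw [PySem.Dict.contains_eq_decide_mem_keys, PySem.Dict.contains_eq_decide_mem_keys, h]
    rw [keys_rectStep, keys_statStep, h, hc]

lemma keys_fold_pos : ∀ (cs : List (Int × Int × Int))
    (dA : PySem.Dict Int (List ((Int × Int) × (Int × Int)))),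
    (∀ k ∈ dA.keys, 0 < k) →
    ∀ k ∈ (cs.foldl (fun d c => rectStep d c.1 c.2.1 c.2.2) dA).keys, 0 < k := by
  intro cs
  induction cs with
  | nil => intro dA h; exact h
  | cons c cs ih =>
    intro dA h
    simp only [List.foldl_cons]
    apply ih
    intro k hk
    rw [keys_rectStep] at hk
    split_ifs at hk with hcond
    · rcases List.mem_append.mp hk with h1 | h1
      · exact h k h1
      · have : k = c.2.2 := by simpa using h1
        exact this ▸ hcond.1
    · exact h k hk

lemma getD_rectStep_self (d : PySem.Dict Int (List ((Int × Int) × (Int × Int))))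
    (i j s : Int) (hs : 0 < s) :
    (rectStep d i j s).getD s [] = d.getD s [] ++ [((i - s + 1, j - s + 1), (i, j))] := by
  by_cases hc : d.contains s = true
  · simp only [rectStep, if_pos hs, hc, if_true]
    rw [PySem.Dict.getD_insert_self]
  · have hc' : d.contains s = false := by simpa using hc
    simp only [rectStep, if_pos hs, hc', Bool.false_eq_true, if_false]
    rw [PySem.Dict.getD_insert_self, PySem.Dict.getD_insert_self,
        PySem.Dict.getD_of_not_contains d [] hc']

lemma getD_rectStep_ne (d : PySem.Dict Int (List ((Int × Int) × (Int × Int))))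
    (i j t s : Int) (hne : s ≠ t) :
    (rectStep d i j t).getD s [] = d.getD s [] := by
  simp only [rectStep]
  split_ifs with ht hc
  · rw [PySem.Dict.getD_insert_of_ne _ _ _ hne]
  · rw [PySem.Dict.getD_insert_of_ne _ _ _ hne, PySem.Dict.getD_insert_of_ne _ _ _ hne]
  · rfl

lemma rect_getD (s : Int) (hs : 0 < s) : ∀ (cs : List (Int × Int × Int))
    (d : PySem.Dict Int (List ((Int × Int) × (Int × Int)))),
    (cs.foldl (fun d c => rectStep d c.1 c.2.1 c.2.2) d).getD s []
    = d.getD s [] ++ (cs.filter (fun c => c.2.2 == s)).map (rectOf s) := by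
  intro cs
  induction cs with
  | nil => intro d; simp
  | cons c cs ih =>
    intro d
    simp only [List.foldl_cons]
    rw [ih]
    by_cases hcs : c.2.2 = s
    · have step : (rectStep d c.1 c.2.1 c.2.2).getD s [] = d.getD s [] ++ [rectOf s c] := by
        rw [hcs, getD_rectStep_self d _ _ s hs]; rfl
      rw [step]
      simp [hcs, List.append_assoc]
    · have step : (rectStep d c.1 c.2.1 c.2.2).getD s [] = d.getD s [] := by
        exact getD_rectStep_ne d _ _ _ s (Ne.symm hcs)
      rw [step]
      simp [hcs]

lemma get?_statStep_self (d : PySem.Dict Int (Int × Int × Int × Int))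
    (i j s : Int) (hs : 0 < s) :
    (statStep d i j s).get? s = mmFold (d.get? s) [(i, j, s)] := by
  simp only [statStep, if_pos hs, mmFold, List.foldl_cons, List.foldl_nil]
  by_cases hc : d.contains s = true
  · obtain ⟨q, hq⟩ : ∃ q, d.get? s = some q := by
      have h2 := PySem.Dict.contains_eq_isSome_get? d s
      rw [hc] at h2
      exact Option.isSome_iff_exists.mp h2.symm
    rw [if_pos hc, PySem.Dict.get?_insert_self, PySem.Dict.getD_of_get?_eq_some d _ hq, hq]
  · have hc' : d.contains s = false := by simpa using hc
    have hq : d.get? s = none := by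
      cases h : d.get? s with
      | none => rfl
      | some q =>
        have h2 := PySem.Dict.contains_eq_isSome_get? d s
        rw [h, hc'] at h2
        simp at h2
    rw [if_neg hc, PySem.Dict.get?_insert_self, hq]

lemma get?_statStep_ne (d : PySem.Dict Int (Int × Int × Int × Int))
    (i j t s : Int) (hne : s ≠ t) :
    (statStep d i j t).get? s = d.get? s := by
  simp only [statStep]
  split_ifs with ht hc
  · rw [PySem.Dict.get?_insert_of_ne _ _ hne]
  · rw [PySem.Dict.get?_insert_of_ne _ _ hne]
  · rfl

lemma stat_get? (s : Int) (hs : 0 < s) : ∀ (cs : List (Int × Int × Int))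
    (d : PySem.Dict Int (Int × Int × Int × Int)),
    (cs.foldl (fun d c => statStep d c.1 c.2.1 c.2.2) d).get? s
    = mmFold (d.get? s) (cs.filter (fun c => c.2.2 == s)) := by
  intro cs
  induction cs with
  | nil => intro d; simp [mmFold]
  | cons c cs ih =>
    intro d
    simp only [List.foldl_cons]
    rw [ih]
    by_cases hcs : c.2.2 = s
    · have step : (statStep d c.1 c.2.1 c.2.2).get? s = mmFold (d.get? s) [(c.1, c.2.1, s)] := by
        rw [hcs, get?_statStep_self d _ _ s hs]
      rw [step]
      simp only [List.filter_cons, hcs, beq_self_eq_true, if_true]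
      simp [mmFold]
    · have step : (statStep d c.1 c.2.1 c.2.2).get? s = d.get? s := by
        exact get?_statStep_ne d _ _ _ s (Ne.symm hcs)
      rw [step]
      simp [hcs]

lemma nonOv_eq (s : Int) (c1 c2 : Int × Int × Int) :
    (!(isOverlapping (rectOf s c1).1 (rectOf s c1).2 (rectOf s c2).1 (rectOf s c2).2))
    = decide (s ≤ c1.1 - c2.1 ∨ s ≤ c2.1 - c1.1 ∨ s ≤ c1.2.1 - c2.2.1 ∨ s ≤ c2.2.1 - c1.2.1) := by
  simp only [isOverlapping, rectOf]
  split_ifs with h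
  · simp only [Bool.not_false]
    exact (decide_eq_true (by omega)).symm
  · simp only [Bool.not_true]
    exact (decide_eq_false (by omega)).symm

lemma pairSearch_iff (s : Int) (hs : 0 < s) : ∀ (sel : List (Int × Int × Int)),
    pairSearch (sel.map (rectOf s)) = true ↔
    ∃ c1 ∈ sel, ∃ c2 ∈ sel,
      (s ≤ c1.1 - c2.1 ∨ s ≤ c2.1 - c1.1 ∨ s ≤ c1.2.1 - c2.2.1 ∨ s ≤ c2.2.1 - c1.2.1) := by
  intro sel
  induction sel with
  | nil => simp [pairSearch]
  | cons x xs ih =>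
    simp only [List.map_cons, pairSearch, Bool.or_eq_true, List.any_eq_true, ih]
    constructor
    · rintro (⟨y, hy, hne⟩ | ⟨c1, hc1, c2, hc2, hcond⟩)
      · obtain ⟨c2, hc2, rfl⟩ := List.mem_map.mp hy
        refine ⟨x, by simp, c2, by simp [hc2], ?_⟩
        rw [nonOv_eq] at hne
        exact of_decide_eq_true hne
      · exact ⟨c1, by simp [hc1], c2, by simp [hc2], hcond⟩
    · rintro ⟨c1, hc1, c2, hc2, hcond⟩
      rcases List.mem_cons.mp hc1 with rfl | hc1'
      · rcases List.mem_cons.mp hc2 with rfl | hc2'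
        · exact absurd hcond (by omega)
        · left
          exact ⟨rectOf s c2, List.mem_map_of_mem hc2', by rw [nonOv_eq]; exact decide_eq_true hcond⟩
      · rcases List.mem_cons.mp hc2 with rfl | hc2'
        · left
          exact ⟨rectOf s c1, List.mem_map_of_mem hc1',
            by rw [nonOv_eq]; exact decide_eq_true (by omega)⟩
        · right
          exact ⟨c1, hc1', c2, hc2', hcond⟩

lemma mmFold_some (sel : List (Int × Int × Int)) : ∀ (q : Int × Int × Int × Int),
    mmFold (some q) sel
    = some ((sel.map (fun c => c.1)).foldl min q.1,
            (sel.map (fun c => c.1)).foldl max q.2.1,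
            (sel.map (fun c => c.2.1)).foldl min q.2.2.1,
            (sel.map (fun c => c.2.1)).foldl max q.2.2.2) := by
  induction sel with
  | nil => intro q; rfl
  | cons c cs ih =>
    intro q
    have h1 : mmFold (some q) (c :: cs)
        = mmFold (some (min q.1 c.1, max q.2.1 c.1, min q.2.2.1 c.2.1, max q.2.2.2 c.2.1)) cs := rfl
    rw [h1, ih]
    rfl

lemma key_equiv (s : Int) (hs : 0 < s) (sel : List (Int × Int × Int)) :
    (pairSearch (sel.map (rectOf s)) = true ↔
      ∃ a b c e, mmFold none sel = some (a, b, c, e) ∧ (s ≤ b - a ∨ s ≤ e - c)) := by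
  cases sel with
  | nil => simp [pairSearch, mmFold]
  | cons x xs =>
    have hmm : mmFold none (x :: xs)
        = some ((xs.map (fun c => c.1)).foldl min x.1,
                (xs.map (fun c => c.1)).foldl max x.1,
                (xs.map (fun c => c.2.1)).foldl min x.2.1,
                (xs.map (fun c => c.2.1)).foldl max x.2.1) := by
      have h1 : mmFold none (x :: xs) = mmFold (some (x.1, x.1, x.2.1, x.2.1)) xs := rfl
      rw [h1, mmFold_some]
    rw [pairSearch_iff s hs, hmm]
    have bnd : ∀ c ∈ x :: xs,
        (xs.map (fun c => c.1)).foldl min x.1 ≤ c.1 ∧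
        c.1 ≤ (xs.map (fun c => c.1)).foldl max x.1 ∧
        (xs.map (fun c => c.2.1)).foldl min x.2.1 ≤ c.2.1 ∧
        c.2.1 ≤ (xs.map (fun c => c.2.1)).foldl max x.2.1 := by
      intro c hc
      rcases List.mem_cons.mp hc with rfl | hc'
      · exact ⟨(PySem.List.foldl_min_le _ _).1, (PySem.List.le_foldl_max _ _).1,
               (PySem.List.foldl_min_le _ _).1, (PySem.List.le_foldl_max _ _).1⟩
      · exact ⟨(PySem.List.foldl_min_le _ _).2 _ (List.mem_map_of_mem hc'),
               (PySem.List.le_foldl_max _ _).2 _ (List.mem_map_of_mem hc'),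
               (PySem.List.foldl_min_le _ _).2 _ (List.mem_map_of_mem hc'),
               (PySem.List.le_foldl_max _ _).2 _ (List.mem_map_of_mem hc')⟩
    constructor
    · rintro ⟨c1, hc1, c2, hc2, hcond⟩
      refine ⟨_, _, _, _, rfl, ?_⟩
      have h1 := bnd c1 hc1
      have h2 := bnd c2 hc2
      omega
    · rintro ⟨a, b, c, e, heq, hcond⟩
      simp only [Option.some.injEq, Prod.mk.injEq] at heq
      obtain ⟨rfl, rfl, rfl, rfl⟩ := heq
      have hattain : ∀ (f : Int × Int × Int → Int) (v : Int),
          ((xs.map f).foldl min (f x) = v ∨ (xs.map f).foldl max (f x) = v) →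
          (v = f x ∨ v ∈ xs.map f) → ∃ cc ∈ x :: xs, f cc = v := by
        intro f v _ hm
        rcases hm with h | h
        · exact ⟨x, by simp, h.symm⟩
        · obtain ⟨cc, hcc, hv⟩ := List.mem_map.mp h
          exact ⟨cc, by simp [hcc], hv⟩
      rcases hcond with h | h
      · obtain ⟨cA, hcA, hA1⟩ := hattain (fun c => c.1) _ (Or.inl rfl)
          (by rcases PySem.List.foldl_min_mem (xs.map (fun c => c.1)) x.1 with hh | hh
              · exact Or.inl hh
              · exact Or.inr hh)
        obtain ⟨cB, hcB, hB1⟩ := hattain (fun c => c.1) _ (Or.inr rfl)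
          (by rcases PySem.List.foldl_max_mem (xs.map (fun c => c.1)) x.1 with hh | hh
              · exact Or.inl hh
              · exact Or.inr hh)
        exact ⟨cB, hcB, cA, hcA, by simp only at hA1 hB1; omega⟩
      · obtain ⟨cA, hcA, hA1⟩ := hattain (fun c => c.2.1) _ (Or.inl rfl)
          (by rcases PySem.List.foldl_min_mem (xs.map (fun c => c.2.1)) x.2.1 with hh | hh
              · exact Or.inl hh
              · exact Or.inr hh)
        obtain ⟨cB, hcB, hB1⟩ := hattain (fun c => c.2.1) _ (Or.inr rfl)
          (by rcases PySem.List.foldl_max_mem (xs.map (fun c => c.2.1)) x.2.1 with hh | hh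
              · exact Or.inl hh
              · exact Or.inr hh)
        exact ⟨cB, hcB, cA, hcA, by simp only at hA1 hB1; omega⟩

lemma search_eq (rd : PySem.Dict Int (List ((Int × Int) × (Int × Int))))
    (sd : PySem.Dict Int (Int × Int × Int × Int)) :
    ∀ ks : List Int,
    (∀ s ∈ ks, (pairSearch (rd.getD s []) = true ↔
       ((sd.getD s (0,0,0,0)).2.1 - (sd.getD s (0,0,0,0)).1 ≥ s ∨
        (sd.getD s (0,0,0,0)).2.2.2 - (sd.getD s (0,0,0,0)).2.2.1 ≥ s))) →
    searchA rd ks = searchB sd ks := by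
  intro ks
  induction ks with
  | nil => intro _; rfl
  | cons s rest ih =>
    intro h
    have hh := h s (by simp)
    simp only [searchA, searchB]
    by_cases hp : pairSearch (rd.getD s []) = true
    · rw [if_pos hp, if_pos (hh.mp hp)]
    · rw [if_neg hp, if_neg (fun hc => hp (hh.mpr hc))]
      exact ih (fun t ht => h t (by simp [ht]))

lemma main_eq (A : List (List Int)) : solution A = solution_alt A := by
  cases A with
  | nil => rfl
  | cons r0 rs =>
    by_cases h0 : r0 = []
    · simp [solution, solution_alt, h0]
    · simp only [solution, solution_alt, if_neg h0]
      rw [rectDictOf_eq, statsOf_eq]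
      set cs := cellsOf (buildDp (r0 :: rs) (PySem.List.len (r0 :: rs)) (PySem.List.len r0))
        (PySem.List.len (r0 :: rs)) (PySem.List.len r0) with hcs
      set rd := cs.foldl (fun d c => rectStep d c.1 c.2.1 c.2.2) PySem.Dict.empty with hrd
      set sd := cs.foldl (fun d c => statStep d c.1 c.2.1 c.2.2) PySem.Dict.empty with hsd
      have hkeys : rd.keys = sd.keys := by
        rw [hrd, hsd]
        exact keys_fold_eq cs _ _ (by rw [PySem.Dict.keys_empty, PySem.Dict.keys_empty])
      rw [hkeys]
      apply search_eq
      intro s hsmem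
      have hsk : s ∈ sd.keys := (PySem.List.mem_sorted _ _ _ _).mp hsmem
      have hspos : 0 < s := by
        refine keys_fold_pos cs PySem.Dict.empty ?_ s ?_
        · rw [PySem.Dict.keys_empty]; intro k hk; cases hk
        · rw [← hrd] at *; rw [hkeys]; exact hsk
      have hA : rd.getD s [] = (cs.filter (fun c => c.2.2 == s)).map (rectOf s) := by
        rw [hrd, rect_getD s hspos cs PySem.Dict.empty, PySem.Dict.getD_empty, List.nil_append]
      have hB : sd.get? s = mmFold none (cs.filter (fun c => c.2.2 == s)) := by
        rw [hsd, stat_get? s hspos cs PySem.Dict.empty, PySem.Dict.get?_empty]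
      rw [hA, key_equiv s hspos]
      cases hmm : mmFold none (cs.filter (fun c => c.2.2 == s)) with
      | none =>
        have hgd : sd.getD s (0,0,0,0) = (0,0,0,0) :=
          PySem.Dict.getD_of_get?_eq_none sd _ (by rw [hB, hmm])
        rw [hgd]
        constructor
        · rintro ⟨a, b, c, e, h, _⟩
          simp at h
        · intro hcon
          exfalso
          simp only at hcon
          omega
      | some q =>
        obtain ⟨a, b, c, e⟩ := q
        have hgd : sd.getD s (0,0,0,0) = (a, b, c, e) :=
          PySem.Dict.getD_of_get?_eq_some sd _ (by rw [hB, hmm])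
        rw [hgd]
        constructor
        · rintro ⟨a', b', c', e', h, hcond⟩
          simp only [Option.some.injEq, Prod.mk.injEq] at h
          obtain ⟨rfl, rfl, rfl, rfl⟩ := h
          simp only
          omega
        · intro hcond
          refine ⟨a, b, c, e, rfl, ?_⟩
          simp only at hcond
          omega

-- ===== VERDICT (by name: the statement is the Claim_ definition above) =====
theorem solution_spec : Claim_equal_solution := by
  intro A _ _
  unfold Spec_solution
  exact main_eq A
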